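-- pv_equiv track=rewrite | github.com/Hasnain-tech295/Virtual-Tech-University | Python/Day2/solution.py | stopwords_count
-- ===== SOURCE A (Python) =====
-- def stopwords_count(data: str) -> dict:
--     stopwords = ['is', 'the', 'a', 'and', 'in']
--
--     data = data.replace(",", "").replace(".", "").lower().split()
--     counts = {word: 0 for word in stopwords}
--
--     for word in data:
--         if word in counts:
--             counts[word] += 1
--     return counts
-- ===== SOURCE B (Python) =====
-- def stopwords_count(data: str) -> dict:
--     words = data.replace(",", "").replace(".", "").lower().split()
--     return {w: words.count(w) for w in ['is', 'the', 'a', 'and', 'in']}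
-- ===== Notes on version B (the rewrite author's own statement) =====
-- stated objective: simpler
-- what changed: B keeps no counting dictionary at all: after the same cleaning it returns {w: words.count(w)} for the five stopwords, replacing A's pre-seeded dict and membership-guarded accumulation loop with five direct list.count scans.
import Mathlib
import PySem

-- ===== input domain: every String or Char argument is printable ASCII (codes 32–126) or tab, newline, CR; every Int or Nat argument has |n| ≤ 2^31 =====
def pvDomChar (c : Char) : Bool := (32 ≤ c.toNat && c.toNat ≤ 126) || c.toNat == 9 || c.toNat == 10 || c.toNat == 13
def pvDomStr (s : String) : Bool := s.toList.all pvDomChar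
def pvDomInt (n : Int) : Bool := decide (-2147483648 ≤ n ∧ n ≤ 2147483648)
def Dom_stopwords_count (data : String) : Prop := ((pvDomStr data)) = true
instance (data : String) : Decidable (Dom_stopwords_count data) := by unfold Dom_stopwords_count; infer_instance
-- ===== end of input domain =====

-- B drops A's counting dictionary entirely: it maps each stopword to a direct list.count scan of the cleaned words (simpler decomposition, same cost).


-- ===== PORT A =====
def stopwords_count (data : String) : List (String × Int) :=
  let stopwords : List String := ["is", "the", "a", "and", "in"]
  let words := PySem.Str.split₀ (PySem.Str.lower (PySem.Str.replace (PySem.Str.replace data "," "") "." ""))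
  let counts : PySem.Dict String Int := stopwords.foldl (fun d w => d.insert w 0) PySem.Dict.empty
  let counts := words.foldl (fun d w => if d.contains w then d.insert w (d.getD w 0 + 1) else d) counts
  counts.items

-- ===== PORT B =====
def stopwords_count_alt (data : String) : List (String × Int) :=
  let words := PySem.Str.split₀ (PySem.Str.lower (PySem.Str.replace (PySem.Str.replace data "," "") "." ""))
  (["is", "the", "a", "and", "in"] : List String).map (fun w => (w, (PySem.List.count words w : Int)))

-- ===== PRECONDITION & SPEC =====
def Spec_stopwords_count (data : String) (out : List (String × Int)) : Prop := out = stopwords_count_alt data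
instance (data : String) (out : List (String × Int)) : Decidable (Spec_stopwords_count data out) := by unfold Spec_stopwords_count; infer_instance

-- ===== CLAIM (what is proved, stated in full; the proofs are below) =====
def Claim_equal_stopwords_count : Prop := ∀ (data : String), Dom_stopwords_count data → Spec_stopwords_count data (stopwords_count data)

-- ===== LEMMAS AND PROOFS =====

-- A's guarded loop never changes the key set.
lemma keys_foldA (words : List String) (d : PySem.Dict String Int) :
    (words.foldl (fun d w => if d.contains w then d.insert w (d.getD w 0 + 1) else d) d).keys = d.keys := by
  induction words generalizing d with
  | nil => rfl
  | cons w ws ih =>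
    simp only [List.foldl]
    by_cases h : d.contains w = true
    · rw [if_pos h, ih, PySem.Dict.keys_insert_of_contains _ _ h]
    · rw [if_neg h, ih]

-- Value at any key after A's guarded loop: the key's count is added iff the key was present.
lemma getD_foldA (words : List String) (d : PySem.Dict String Int) (k : String) :
    (words.foldl (fun d w => if d.contains w then d.insert w (d.getD w 0 + 1) else d) d).getD k 0
      = d.getD k 0 + (if d.contains k then (words.count k : Int) else 0) := by
  induction words generalizing d with
  | nil => simp
  | cons w ws ih =>
    simp only [List.foldl]
    by_cases h : d.contains w = true
    · rw [if_pos h, ih]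
      by_cases hk : k = w
      · subst hk
        rw [PySem.Dict.getD_insert_self]
        have hc : (d.insert k (d.getD k 0 + 1)).contains k = true := PySem.Dict.contains_insert_self _ _ _
        rw [if_pos hc, if_pos h]
        simp
        ring
      · rw [PySem.Dict.getD_insert_of_ne _ _ _ hk]
        have hc : (d.insert w (d.getD w 0 + 1)).contains k = d.contains k := by
          rw [PySem.Dict.contains_insert]
          cases hkw : (k == w) with
          | true => simp at hkw; exact absurd hkw hk
          | false => simp
        rw [hc]
        have : (w :: ws).count k = ws.count k := by
          simp [Ne.symm hk]
        rw [this]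
    · rw [if_neg h, ih]
      by_cases hk : k = w
      · subst hk
        rw [if_neg h, if_neg h]
      · have : (w :: ws).count k = ws.count k := by
          simp [Ne.symm hk]
        rw [this]

-- A's dict result, listed as items, is exactly the stopword→count map B builds directly.
lemma foldAB_eq (ws : List String) :
    (ws.foldl (fun d w => if d.contains w then d.insert w (d.getD w 0 + 1) else d)
      ((["is", "the", "a", "and", "in"] : List String).foldl (fun d w => d.insert w 0) (PySem.Dict.empty : PySem.Dict String Int))).items
    = (["is", "the", "a", "and", "in"] : List String).map (fun w => (w, (PySem.List.count ws w : Int))) := by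
  have hkeys : ((ws.foldl (fun d w => if d.contains w then d.insert w (d.getD w 0 + 1) else d)
      ((["is", "the", "a", "and", "in"] : List String).foldl (fun d w => d.insert w 0) (PySem.Dict.empty : PySem.Dict String Int)))).keys
      = ["is", "the", "a", "and", "in"] := by
    rw [keys_foldA]; decide
  have hnd : ((ws.foldl (fun d w => if d.contains w then d.insert w (d.getD w 0 + 1) else d)
      ((["is", "the", "a", "and", "in"] : List String).foldl (fun d w => d.insert w 0) (PySem.Dict.empty : PySem.Dict String Int)))).keys.Nodup := by
    rw [hkeys]; decide
  rw [PySem.Dict.items_eq_map_keys _ hnd 0, hkeys]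
  apply List.map_congr_left
  intro a ha
  rw [getD_foldA, PySem.List.count_eq]
  fin_cases ha <;>
    simp [PySem.Dict.getD_insert, PySem.Dict.contains_insert]

-- ===== VERDICT (by name: the statement is the Claim_ definition above) =====
theorem stopwords_count_spec : Claim_equal_stopwords_count := by
  intro data _
  exact foldAB_eq (PySem.Str.split₀ (PySem.Str.lower (PySem.Str.replace (PySem.Str.replace data "," "") "." "")))
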